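-- pv_equiv track=rewrite | github.com/oberlin-t/advent-of-code | 2021/day8/day8part2.py | get_3_5
-- ===== SOURCE A (Python) =====
-- def many_in_common(str1, str2):
--     total = 0
--     for i in str1:
--         if i in str2:
--             total += 1
--     return total
--
-- def get_3_5(data, two_string):
--     three_str, five_str = '',''
--     for i in data.split():
--         if len(i) == 5:
--             if many_in_common(i, two_string) == 4:
--                 three_str = i
--             elif many_in_common(i, two_string) == 3:
--                 five_str = i
--     return three_str, five_str
-- ===== SOURCE B (Python) =====
-- def get_3_5(data, two_string):
--     # Scan the tokens BACK-TO-FRONT and take the FIRST length-5 token with the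
--     # wanted overlap count (first match on the reversed list = A's last-wins),
--     # as two independent early-exit searches instead of one accumulator loop.
--     toks = data.split()[::-1]
--
--     def first_with(k):
--         return next((w for w in toks
--                      if len(w) == 5 and sum(c in two_string for c in w) == k), '')
--
--     return first_with(4), first_with(3)
-- ===== Notes on version B (the rewrite author's own statement) =====
-- stated objective: alternative
-- what changed: Instead of one forward accumulator loop with if/elif overwrite, B reverses the token list and performs two independent early-exit first-match searches (next over a generator) for overlap counts 4 and 3, exploiting that last-wins forward equals first-match backward.
import Mathlib
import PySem

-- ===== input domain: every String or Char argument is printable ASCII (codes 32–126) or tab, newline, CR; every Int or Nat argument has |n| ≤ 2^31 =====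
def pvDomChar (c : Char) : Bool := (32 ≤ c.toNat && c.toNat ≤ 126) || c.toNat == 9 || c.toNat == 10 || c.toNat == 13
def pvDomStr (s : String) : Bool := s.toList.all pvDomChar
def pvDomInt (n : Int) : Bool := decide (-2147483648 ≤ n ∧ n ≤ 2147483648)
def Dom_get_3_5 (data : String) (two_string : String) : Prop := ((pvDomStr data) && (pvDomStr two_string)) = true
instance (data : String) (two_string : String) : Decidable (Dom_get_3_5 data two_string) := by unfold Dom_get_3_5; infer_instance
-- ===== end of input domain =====

-- B replaces A's forward accumulator loop (if/elif overwrite) by two independent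
-- early-exit first-match searches over the reversed token list (objective: alternative).


-- ===== PORT A =====
def many_in_common (str1 : String) (str2 : String) : Int :=
  str1.toList.foldl (fun total i => if PySem.Chars.isIn [i] str2.toList then total + 1 else total) 0

def get_3_5 (data : String) (two_string : String) : String × String :=
  (PySem.Str.split₀ data).foldl
    (fun (st : String × String) i =>
      if PySem.Str.len i == 5 then
        if many_in_common i two_string == 4 then (i, st.2)
        else if many_in_common i two_string == 3 then (st.1, i)
        else st
      else st)
    ("", "")

-- ===== PORT B =====
-- sum(c in two_string for c in w)
def overlapCount (w : String) (two_string : String) : Int :=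
  (w.toList.map (fun c => if PySem.Chars.isIn [c] two_string.toList then (1 : Int) else 0)).sum

def get_3_5_alt (data : String) (two_string : String) : String × String :=
  let toks := (PySem.Str.split₀ data).reverse
  let first_with := fun (k : Int) =>
    (toks.find? (fun w => PySem.Str.len w == 5 && overlapCount w two_string == k)).getD ""
  (first_with 4, first_with 3)

-- ===== PRECONDITION & SPEC =====
def Spec_get_3_5 (data : String) (two_string : String) (out : String × String) : Prop := out = get_3_5_alt data two_string
instance (data : String) (two_string : String) (out : String × String) : Decidable (Spec_get_3_5 data two_string out) := by unfold Spec_get_3_5; infer_instance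

-- ===== CLAIM (what is proved, stated in full; the proofs are below) =====
def Claim_equal_get_3_5 : Prop := ∀ (data : String) (two_string : String), Dom_get_3_5 data two_string → Spec_get_3_5 data two_string (get_3_5 data two_string)

-- ===== LEMMAS AND PROOFS =====

-- the last token of the list that has length 5 and overlap count k (proof-only helper)
def lastTok (two_string : String) (k : Int) : List String → Option String
  | [] => none
  | x :: xs =>
    match lastTok two_string k xs with
    | some y => some y
    | none =>
      if PySem.Str.len x == 5 then
        if many_in_common x two_string == k then some x else none
      else none

lemma overlap_aux (s2 : String) (w : List Char) : ∀ a : Int,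
    w.foldl (fun total i => if PySem.Chars.isIn [i] s2.toList then total + 1 else total) a
    = a + (w.map (fun c => if PySem.Chars.isIn [c] s2.toList then (1 : Int) else 0)).sum := by
  induction w with
  | nil => intro a; simp
  | cons c w ih => intro a; rw [List.foldl_cons, ih, List.map_cons, List.sum_cons]; split_ifs <;> ring

lemma overlapCount_eq (x : String) (s2 : String) :
    overlapCount x s2 = many_in_common x s2 := by
  unfold overlapCount many_in_common
  rw [overlap_aux]
  simp

lemma loopA_eq (s2 : String) (ts : List String) : ∀ t f : String,
    ts.foldl
      (fun (st : String × String) i =>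
        if PySem.Str.len i == 5 then
          if many_in_common i s2 == 4 then (i, st.2)
          else if many_in_common i s2 == 3 then (st.1, i)
          else st
        else st) (t, f)
    = ((lastTok s2 4 ts).getD t, (lastTok s2 3 ts).getD f) := by
  induction ts with
  | nil => intro t f; simp [lastTok]
  | cons x xs ih =>
    intro t f
    rw [List.foldl_cons]
    by_cases h5 : PySem.Str.len x == 5
    · by_cases h4 : many_in_common x s2 == 4
      · have h3 : ¬ (many_in_common x s2 == 3) := by
          simp only [beq_iff_eq] at h4 ⊢; omega
        simp only [h5, h4, if_pos]
        rw [ih]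
        simp only [lastTok, h5, h4, h3]
        cases lastTok s2 4 xs <;> cases lastTok s2 3 xs <;> simp
      · by_cases h3 : many_in_common x s2 == 3
        · simp only [h5, h4, h3, if_pos]
          rw [ih]
          simp only [lastTok, h5, h4, h3]
          cases lastTok s2 4 xs <;> cases lastTok s2 3 xs <;> simp
        · simp only [h5, h4, h3]
          rw [ih]
          simp only [lastTok, h5, h4, h3]
          cases lastTok s2 4 xs <;> cases lastTok s2 3 xs <;> simp
    · simp only [h5]
      rw [ih]
      have hb : (PySem.Str.len x == 5) = false := by simpa using h5
      simp only [lastTok, hb]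
      cases lastTok s2 4 xs <;> cases lastTok s2 3 xs <;> simp

lemma lastTok_eq_find_reverse (s2 : String) (k : Int) (ts : List String) :
    lastTok s2 k ts
    = ts.reverse.find? (fun w => PySem.Str.len w == 5 && many_in_common w s2 == k) := by
  induction ts with
  | nil => simp [lastTok]
  | cons x xs ih =>
    rw [List.reverse_cons, List.find?_append, ← ih]
    cases hl : lastTok s2 k xs with
    | some y => simp [lastTok, hl]
    | none =>
      simp only [lastTok, hl, Option.none_or, List.find?_singleton]
      split_ifs with h5 hk hc <;> simp_all [PySem.Str.len]

-- ===== VERDICT (by name: the statement is the Claim_ definition above) =====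
theorem get_3_5_spec : Claim_equal_get_3_5 := by
  intro data s2 _
  unfold Spec_get_3_5 get_3_5 get_3_5_alt
  rw [loopA_eq]
  have hp : (fun w => PySem.Str.len w == 5 && overlapCount w s2 == 4)
      = (fun w => PySem.Str.len w == 5 && many_in_common w s2 == 4) := by
    funext w; rw [overlapCount_eq]
  have hp3 : (fun w => PySem.Str.len w == 5 && overlapCount w s2 == 3)
      = (fun w => PySem.Str.len w == 5 && many_in_common w s2 == 3) := by
    funext w; rw [overlapCount_eq]
  simp only [hp, hp3, ← lastTok_eq_find_reverse]
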